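-- pv_equiv track=rewrite | github.com/tejasphatak/webmind-research | papers/new-gen-ai/src/generator.py | _parse_template_structure
-- ===== SOURCE A (Python) =====
-- def _parse_template_structure(pattern: str) -> list:
--     """
--     Parse a template pattern into an ordered structure.
--
--     "[PERSON] wrote [WORK]" → [("slot", "PERSON"), ("word", "wrote"), ("slot", "WORK")]
--
--     Uses simple character-level parsing, no regex.
--     """
--     parts = []
--     i = 0
--     current_word = []
--
--     while i < len(pattern):
--         if pattern[i] == '[':
--             # Flush any accumulated word
--             if current_word:
--                 word = ''.join(current_word).strip()
--                 if word:
--                     for w in word.split():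
--                         parts.append(("word", w.lower()))
--                 current_word = []
--             # Find closing bracket
--             j = pattern.index(']', i)
--             slot_name = pattern[i + 1:j]
--             parts.append(("slot", slot_name))
--             i = j + 1
--         else:
--             current_word.append(pattern[i])
--             i += 1
--
--     # Flush remaining
--     if current_word:
--         word = ''.join(current_word).strip()
--         if word:
--             for w in word.split():
--                 parts.append(("word", w.lower()))
--
--     return parts
-- ===== SOURCE B (Python) =====
-- def _parse_template_structure(pattern: str) -> list:
--     parts = []
--     rest = pattern
--     while rest:
--         head, br, rest = rest.partition('[')
--         parts.extend(("word", w.lower()) for w in head.split())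
--         if br:
--             name, _, rest = rest.partition(']')
--             parts.append(("slot", name))
--     return parts
-- ===== Notes on version B (the rewrite author's own statement) =====
-- stated objective: faster
-- what changed: B repeatedly splits the remaining string with str.partition on '[' and ']' instead of A's per-character scanner with an accumulated word buffer and pattern.index().
-- outside the precondition, e.g. on _parse_template_structure('['): A raises ValueError, B returns [('slot', '')]
-- crash fix: On patterns containing a '[' with no ']' after it A raises ValueError (from pattern.index); B returns a value, treating the unterminated bracket as a slot running to the end of the string. — e.g. on _parse_template_structure("fo [ba"): A raises ValueError, B returns [("word", "fo"), ("slot", "ba")]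
import Mathlib
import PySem

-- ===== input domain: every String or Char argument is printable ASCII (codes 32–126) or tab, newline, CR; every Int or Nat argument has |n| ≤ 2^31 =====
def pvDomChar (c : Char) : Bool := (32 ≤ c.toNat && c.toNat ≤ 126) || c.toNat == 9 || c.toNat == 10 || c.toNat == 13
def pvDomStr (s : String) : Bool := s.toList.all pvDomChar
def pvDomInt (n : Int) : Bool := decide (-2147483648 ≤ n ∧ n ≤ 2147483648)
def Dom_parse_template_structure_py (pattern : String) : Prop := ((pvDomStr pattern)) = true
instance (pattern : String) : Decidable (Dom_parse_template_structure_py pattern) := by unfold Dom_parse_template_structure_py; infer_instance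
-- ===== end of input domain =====

-- B replaces A's per-character scanner (word buffer + pattern.index) by repeated str.partition
-- on '[' and ']'; simpler. Equivalence is claimed on Pre_ (patterns where A does not raise).

-- ===== PORT A =====

-- pattern.index(']', i): chars strictly between i and the first ']' after it, and the chars
-- after that ']' (none = ValueError)
def pvFindCloseA : List Char → Option (List Char × List Char)
  | [] => none
  | c :: cs =>
    if c = ']' then some ([], cs)
    else
      match pvFindCloseA cs with
      | some (a, b) => some (c :: a, b)
      | none => none

-- flush of current_word: word = ''.join(cw).strip(); if word: for w in word.split(): ("word", w.lower())
def pvFlushA (cw : List Char) : List (String × String) :=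
  let word := PySem.Chars.strip cw
  if word ≠ [] then
    (PySem.Chars.split₀ word).map (fun w => ("word", String.ofList (PySem.Chars.lower w)))
  else []

-- the while-loop of A: state = (remaining chars, current_word, parts); the fuel (≥ remaining
-- length, one unit per consumed character) only makes the recursion structural
def pvLoopA : Nat → List Char → List Char → List (String × String) → List (String × String)
  | _, [], cw, parts => parts ++ pvFlushA cw
  | 0, _ :: _, cw, parts => parts ++ pvFlushA cw   -- fuel exhausted; never reached (fuel = length)
  | fuel + 1, c :: rest, cw, parts =>
    if c = '[' then
      match pvFindCloseA rest with
      | some (name, rest') =>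
          pvLoopA fuel rest' [] ((parts ++ pvFlushA cw) ++ [("slot", String.ofList name)])
      | none => parts ++ pvFlushA cw   -- pattern.index raises ValueError here (outside Pre_)
    else pvLoopA fuel rest (cw ++ [c]) parts

def parse_template_structure_py (pattern : String) : List (String × String) :=
  pvLoopA pattern.toList.length pattern.toList [] []

-- ===== PORT B =====

-- s.partition(sep) for a one-character sep (exact: split at the first occurrence,
-- (s, false, []) if sep is absent; the Bool is whether the separator was found)
def pvPartitionB (sep : Char) : List Char → List Char × Bool × List Char
  | [] => ([], false, [])
  | c :: cs =>
    if c = sep then ([], true, cs)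
    else
      match pvPartitionB sep cs with
      | (h, f, t) => (c :: h, f, t)

-- ("word", w.lower()) for w in seg.split()
def pvWordsB (seg : List Char) : List (String × String) :=
  (PySem.Chars.split₀ seg).map (fun w => ("word", String.ofList (PySem.Chars.lower w)))

-- the while-loop of B over the remaining string (fuel ≥ remaining length, for structural recursion)
def pvLoopB : Nat → List Char → List (String × String)
  | _, [] => []
  | 0, _ :: _ => []   -- fuel exhausted; never reached (fuel = length)
  | fuel + 1, c :: cs =>
    match pvPartitionB '[' (c :: cs) with
    | (head, br, tail) =>
      pvWordsB head ++
        (if br then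
          match pvPartitionB ']' tail with
          | (name, _, rest') => ("slot", String.ofList name) :: pvLoopB fuel rest'
        else [])

def parse_template_structure_py_alt (pattern : String) : List (String × String) :=
  pvLoopB pattern.toList.length pattern.toList

-- ===== PRECONDITION & SPEC =====

-- Pre_ excludes exactly the patterns on which A raises ValueError: those containing a '['
-- with no ']' anywhere after it (pattern.index(']', i) fails there).
def Pre_parse_template_structure_py (pattern : String) : Prop :=
  ∀ (i : Nat) (h : i < pattern.toList.length),
    pattern.toList[i] = '[' → ']' ∈ pattern.toList.drop (i + 1)

instance (pattern : String) : Decidable (Pre_parse_template_structure_py pattern) := by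
  unfold Pre_parse_template_structure_py; infer_instance

def pvWitness_parse_template_structure_py : String := "[PERSON] wrote [WORK]"

-- On patterns containing a '[' with no ']' after it A raises ValueError (from pattern.index);
-- B returns a value, treating the unterminated bracket as a slot running to the end
-- (checked by parse_template_structure_py_raises at the bottom of the file).
def Raises_parse_template_structure_py (pattern : String) : Prop :=
  ¬ Pre_parse_template_structure_py pattern

instance (pattern : String) : Decidable (Raises_parse_template_structure_py pattern) := by
  unfold Raises_parse_template_structure_py; infer_instance

def pvRaiseWitness_parse_template_structure_py : String := "fo [ba"
def pvRaiseWitnessOut_parse_template_structure_py : List (String × String) :=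
  [("word", "fo"), ("slot", "ba")]

def Spec_parse_template_structure_py (pattern : String) (out : List (String × String)) : Prop :=
  out = parse_template_structure_py_alt pattern

instance (pattern : String) (out : List (String × String)) :
    Decidable (Spec_parse_template_structure_py pattern out) := by
  unfold Spec_parse_template_structure_py; infer_instance

-- ===== CLAIM (what is proved, stated in full; the proofs are below) =====
def Claim_equal_parse_template_structure_py : Prop :=
  ∀ (pattern : String), Dom_parse_template_structure_py pattern →
    Pre_parse_template_structure_py pattern →
    Spec_parse_template_structure_py pattern (parse_template_structure_py pattern)

def Claim_raises_parse_template_structure_py : Prop :=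
  (∀ (pattern : String), Dom_parse_template_structure_py pattern →
    Raises_parse_template_structure_py pattern → ¬ Pre_parse_template_structure_py pattern) ∧
  (Dom_parse_template_structure_py (pvRaiseWitness_parse_template_structure_py) ∧
   Raises_parse_template_structure_py (pvRaiseWitness_parse_template_structure_py) ∧
   parse_template_structure_py_alt (pvRaiseWitness_parse_template_structure_py) =
     pvRaiseWitnessOut_parse_template_structure_py)

-- ===== LEMMAS AND PROOFS =====

-- every '[' in cs is followed by a ']' (suffix form of Pre_, convenient for induction)
def pvSufPre (cs : List Char) : Prop :=
  ∀ l₁ l₂ : List Char, cs = l₁ ++ '[' :: l₂ → ']' ∈ l₂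

theorem pvSufPre_tail {c : Char} {cs : List Char} (h : pvSufPre (c :: cs)) : pvSufPre cs := by
  intro l₁ l₂ hdec
  exact h (c :: l₁) l₂ (by simp [hdec])

theorem pvPre_toSuf {pattern : String} (h : Pre_parse_template_structure_py pattern) :
    pvSufPre pattern.toList := by
  intro l₁ l₂ hdec
  have hlen : l₁.length < pattern.toList.length := by rw [hdec]; simp
  have hget : pattern.toList[l₁.length]'hlen = '[' := by simp [hdec]
  have := h l₁.length hlen hget
  rw [hdec] at this
  have hdrop : (l₁ ++ '[' :: l₂).drop (l₁.length + 1) = l₂ := by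
    rw [show l₁ ++ '[' :: l₂ = (l₁ ++ ['[']) ++ l₂ by simp,
        show l₁.length + 1 = (l₁ ++ ['[']).length by simp]
    exact List.drop_left
  rwa [hdrop] at this

theorem pvFindCloseA_some {cs : List Char} (h : ']' ∈ cs) :
    ∃ a b, pvFindCloseA cs = some (a, b) := by
  induction cs with
  | nil => simp at h
  | cons c cs ih =>
    by_cases hc : c = ']'
    · exact ⟨[], cs, by simp [pvFindCloseA, hc]⟩
    · have : ']' ∈ cs := by
        rcases List.mem_cons.mp h with h1 | h1
        · exact absurd h1.symm hc
        · exact h1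
      obtain ⟨a, b, hab⟩ := ih this
      exact ⟨c :: a, b, by simp [pvFindCloseA, hc, hab]⟩

theorem pvFindCloseA_decomp : ∀ {cs a b : List Char},
    pvFindCloseA cs = some (a, b) → cs = a ++ ']' :: b := by
  intro cs
  induction cs with
  | nil => intro a b h; simp [pvFindCloseA] at h
  | cons c cs ih =>
    intro a b h
    by_cases hc : c = ']'
    · simp [pvFindCloseA, hc] at h
      simp [hc, ← h.1, ← h.2]
    · simp only [pvFindCloseA, if_neg hc] at h
      cases hfc : pvFindCloseA cs with
      | none => rw [hfc] at h; simp at h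
      | some p =>
        rw [hfc] at h
        obtain ⟨a', b'⟩ := p
        simp at h
        have := ih hfc
        rw [← h.1, ← h.2]
        simp [this]

-- A's index-based close finder and B's partition on ']' produce the same split
theorem pvFindCloseA_partition : ∀ {cs a b : List Char},
    pvFindCloseA cs = some (a, b) → pvPartitionB ']' cs = (a, true, b) := by
  intro cs
  induction cs with
  | nil => intro a b h; simp [pvFindCloseA] at h
  | cons c cs ih =>
    intro a b h
    by_cases hc : c = ']'
    · simp [pvFindCloseA, hc] at h
      simp [pvPartitionB, hc, ← h.1, ← h.2]
    · simp only [pvFindCloseA, if_neg hc] at h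
      cases hfc : pvFindCloseA cs with
      | none => rw [hfc] at h; simp at h
      | some p =>
        rw [hfc] at h
        obtain ⟨a', b'⟩ := p
        simp at h
        simp [pvPartitionB, hc, ih hfc, ← h.1, ← h.2]

-- partition of cw ++ s at sep, when sep does not occur in cw, passes cw into the head
theorem pvPartitionB_append {sep : Char} : ∀ {cw : List Char} (s : List Char), sep ∉ cw →
    pvPartitionB sep (cw ++ s) = (cw ++ (pvPartitionB sep s).1, (pvPartitionB sep s).2) := by
  intro cw
  induction cw with
  | nil => intro s _; simp
  | cons c cw ih =>
    intro s hmem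
    have hc : ¬ c = sep := by simp at hmem; exact fun h => hmem.1 h.symm
    have := ih s (by simp at hmem; exact fun h => hmem.2 h)
    simp only [List.cons_append, pvPartitionB, if_neg hc, this]

-- split₀.go with all-whitespace cs and empty current word flushes the accumulator
theorem pvGo_spaces : ∀ (cs : List Char) (acc : List (List Char)),
    (∀ c ∈ cs, PySem.Chars.isspace c = true) →
    PySem.Chars.split₀.go cs [] acc = acc.reverse := by
  intro cs
  induction cs with
  | nil => intro acc _; simp [PySem.Chars.split₀.go]
  | cons c cs ih =>
    intro acc h
    have hc : PySem.Chars.isspace c = true := h c (by simp)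
    simp only [PySem.Chars.split₀.go, hc, if_pos, List.isEmpty_nil]
    exact ih acc (fun x hx => h x (by simp [hx]))

-- trailing whitespace never contributes a word
theorem pvGo_append_spaces : ∀ (s ws cur : List Char) (acc : List (List Char)),
    (∀ c ∈ ws, PySem.Chars.isspace c = true) →
    PySem.Chars.split₀.go (s ++ ws) cur acc = PySem.Chars.split₀.go s cur acc := by
  intro s
  induction s with
  | nil =>
    intro ws cur acc h
    cases ws with
    | nil => simp
    | cons w ws =>
      have hw : PySem.Chars.isspace w = true := h w (by simp)
      have hws : ∀ c ∈ ws, PySem.Chars.isspace c = true := fun x hx => h x (by simp [hx])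
      simp only [List.nil_append, PySem.Chars.split₀.go, hw, if_true]
      by_cases hcur : cur.isEmpty
      · simp only [hcur, if_true, pvGo_spaces ws acc hws]
      · simp only [hcur, pvGo_spaces ws _ hws]
  | cons c s ih =>
    intro ws cur acc h
    simp only [List.cons_append, PySem.Chars.split₀.go]
    by_cases hc : PySem.Chars.isspace c = true
    · simp only [hc, if_true]
      by_cases hcur : cur.isEmpty <;> simp [hcur, ih ws _ _ h]
    · rw [if_neg hc, if_neg hc, ih ws _ _ h]

-- leading whitespace never contributes a word
theorem pvGo_dropWhile : ∀ (s : List Char) (acc : List (List Char)),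
    PySem.Chars.split₀.go (s.dropWhile PySem.Chars.isspace) [] acc =
      PySem.Chars.split₀.go s [] acc := by
  intro s
  induction s with
  | nil => intro acc; simp
  | cons c s ih =>
    intro acc
    by_cases hc : PySem.Chars.isspace c = true
    · rw [List.dropWhile_cons_of_pos hc, ih]
      simp [PySem.Chars.split₀.go, hc]
    · rw [List.dropWhile_cons_of_neg (by simpa using hc)]

-- str.split() ignores leading/trailing whitespace: split₀ ∘ strip = split₀
theorem pvSplit₀_strip (cs : List Char) :
    PySem.Chars.split₀ (PySem.Chars.strip cs) = PySem.Chars.split₀ cs := by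
  unfold PySem.Chars.strip PySem.Chars.rstrip PySem.Chars.lstrip PySem.Chars.split₀
  have hws : ∀ c ∈ (List.takeWhile PySem.Chars.isspace
      (List.dropWhile PySem.Chars.isspace cs).reverse).reverse,
      PySem.Chars.isspace c = true := by
    intro c hc
    exact List.mem_takeWhile_imp (by simpa using hc)
  rw [← pvGo_append_spaces _ _ [] [] hws]
  have hsplit : (List.dropWhile PySem.Chars.isspace
        (List.dropWhile PySem.Chars.isspace cs).reverse).reverse ++
      (List.takeWhile PySem.Chars.isspace
        (List.dropWhile PySem.Chars.isspace cs).reverse).reverse =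
      List.dropWhile PySem.Chars.isspace cs := by
    rw [← List.reverse_append, List.takeWhile_append_dropWhile, List.reverse_reverse]
  rw [hsplit, pvGo_dropWhile]

theorem pvFlushA_eq_words (cw : List Char) : pvFlushA cw = pvWordsB cw := by
  unfold pvFlushA pvWordsB
  by_cases h : PySem.Chars.strip cw = []
  · rw [← pvSplit₀_strip cw, h]
    simp [PySem.Chars.split₀, PySem.Chars.split₀.go]
  · simp only [h, ne_eq, not_false_eq_true, if_true, pvSplit₀_strip]

-- pvSufPre survives jumping past a completed slot
theorem pvSufPre_after {c : Char} {rest name rest' : List Char}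
    (h : pvSufPre (c :: rest)) (hdec : rest = name ++ ']' :: rest') : pvSufPre rest' := by
  intro l₁ l₂ hdec'
  exact h (c :: name ++ ']' :: l₁) l₂ (by simp [hdec, hdec'])

-- B's loop on a bracket-free string is one word pass
theorem pvLoopB_noBracket (m : Nat) (cw : List Char) (hm : cw.length ≤ m) (hcw : '[' ∉ cw) :
    pvLoopB m cw = pvWordsB cw := by
  cases cw with
  | nil => simp [pvLoopB, pvWordsB, PySem.Chars.split₀, PySem.Chars.split₀.go]
  | cons x xs =>
    cases m with
    | zero => simp at hm
    | succ m =>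
      have hpart : pvPartitionB '[' (x :: xs) = (x :: xs, false, []) := by
        have := pvPartitionB_append (sep := '[') (cw := x :: xs) [] hcw
        simpa [pvPartitionB] using this
      simp [pvLoopB, hpart]

-- the main invariant: A's loop from state (cs, cw, parts) produces parts ++ B's result on cw ++ cs
theorem pvMain : ∀ (n : Nat) (cs cw : List Char) (parts : List (String × String)) (m : Nat),
    cs.length ≤ n → (cw ++ cs).length ≤ m → pvSufPre cs → '[' ∉ cw →
    pvLoopA n cs cw parts = parts ++ pvLoopB m (cw ++ cs) := by
  intro n
  induction n with
  | zero =>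
    intro cs cw parts m hn hm _ hcw
    have hcs : cs = [] := List.eq_nil_of_length_eq_zero (Nat.le_zero.mp hn)
    subst hcs
    rw [List.append_nil] at hm ⊢
    rw [pvLoopB_noBracket m cw hm hcw, ← pvFlushA_eq_words]
    rfl
  | succ n ih =>
    intro cs cw parts m hn hm hpre hcw
    cases cs with
    | nil =>
      rw [List.append_nil] at hm ⊢
      rw [pvLoopB_noBracket m cw hm hcw, ← pvFlushA_eq_words]
      rfl
    | cons c rest =>
      by_cases hc : c = '['
      · subst hc
        obtain ⟨name, rest', hfc⟩ := pvFindCloseA_some (hpre [] rest rfl)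
        have hdec := pvFindCloseA_decomp hfc
        have hlhs : pvLoopA (n + 1) ('[' :: rest) cw parts =
            pvLoopA n rest' [] ((parts ++ pvFlushA cw) ++ [("slot", String.ofList name)]) := by
          simp [pvLoopA, hfc]
        have hlen : rest.length = name.length + 1 + rest'.length := by simp [hdec]; omega
        cases m with
        | zero => simp at hm
        | succ m =>
          have hih := ih rest' [] ((parts ++ pvFlushA cw) ++ [("slot", String.ofList name)]) m
            (by simp at hn; omega) (by simp at hm ⊢; omega)
            (pvSufPre_after hpre hdec) (by simp)
          have hpartL : pvPartitionB '[' (cw ++ '[' :: rest) = (cw, true, rest) := by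
            have := pvPartitionB_append (sep := '[') (cw := cw) ('[' :: rest) hcw
            simpa [pvPartitionB] using this
          have hpartR : pvPartitionB ']' rest = (name, true, rest') := pvFindCloseA_partition hfc
          have hrhs : pvLoopB (m + 1) (cw ++ '[' :: rest) =
              pvWordsB cw ++ ("slot", String.ofList name) :: pvLoopB m rest' := by
            rcases hs : cw ++ '[' :: rest with _ | ⟨x, xs⟩
            · simp at hs
            · rw [hs] at hpartL
              simp [pvLoopB, hpartL, hpartR]
          rw [hlhs, hih, hrhs, pvFlushA_eq_words]
          simp
      · have hlhs : pvLoopA (n + 1) (c :: rest) cw parts = pvLoopA n rest (cw ++ [c]) parts := by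
          simp [pvLoopA, hc]
        have hih := ih rest (cw ++ [c]) parts m (by simpa using hn) (by simpa using hm)
          (pvSufPre_tail hpre) (by simp [hcw]; exact fun h => hc h.symm)
        rw [hlhs, hih]
        simp

-- ===== VERDICT (by name: the statement is the Claim_ definition above) =====
theorem parse_template_structure_py_spec : Claim_equal_parse_template_structure_py := by
  intro pattern _ hpre
  unfold Spec_parse_template_structure_py parse_template_structure_py parse_template_structure_py_alt
  simpa using pvMain pattern.toList.length pattern.toList [] [] pattern.toList.length
    le_rfl (by simp) (pvPre_toSuf hpre) (by simp)

theorem parse_template_structure_py_raises : Claim_raises_parse_template_structure_py := by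
  unfold Claim_raises_parse_template_structure_py
  exact ⟨fun _ _ h => h, by decide⟩

-- self-check: the raise witness really lies inside the stated raise region
theorem pvRaiseWitness_ok :
    Raises_parse_template_structure_py pvRaiseWitness_parse_template_structure_py := by
  have h := parse_template_structure_py_raises
  unfold Claim_raises_parse_template_structure_py at h
  exact h.2.2.1
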